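-- pv_equiv track=rewrite | github.com/conflabermits/Scripts | python/wordle/wordle_helper.py | process_misses
-- ===== SOURCE A (Python) =====
-- def process_misses(valid_guesses, misses, dupes):
--     # Take the full list,
--     # remove anything that has definite missed letters,
--     # Return result (as list)
--     result = []
--     for guess in valid_guesses:
--         potential_guess = True
--         for miss_letter in misses:
--             if miss_letter in guess and miss_letter not in dupes:
--                 potential_guess = False
--         if potential_guess == True:
--             result.append(guess)
--     return result
-- ===== SOURCE B (Python) =====
-- def process_misses(valid_guesses, misses, dupes):
--     # Inverted loop structure: instead of testing each guess against every
--     # miss, iterate over the misses and successively narrow the candidate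
--     # list, removing guesses containing each disqualifying letter.
--     # Order of guesses is preserved since each narrowing pass keeps order.
--     result = list(valid_guesses)
--     for m in misses:
--         if m not in dupes:
--             result = [g for g in result if m not in g]
--     return result
-- ===== Notes on version B (the rewrite author's own statement) =====
-- stated objective: faster
-- what changed: B inverts the loop nesting: it iterates over misses in the outer loop and successively narrows the candidate guess list (removing guesses containing each disqualifying letter), instead of A's per-guess inner scan over all misses with a flag accumulator; eliminated guesses are never scanned again, so the candidate list shrinks as letters are processed.
import Mathlib
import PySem

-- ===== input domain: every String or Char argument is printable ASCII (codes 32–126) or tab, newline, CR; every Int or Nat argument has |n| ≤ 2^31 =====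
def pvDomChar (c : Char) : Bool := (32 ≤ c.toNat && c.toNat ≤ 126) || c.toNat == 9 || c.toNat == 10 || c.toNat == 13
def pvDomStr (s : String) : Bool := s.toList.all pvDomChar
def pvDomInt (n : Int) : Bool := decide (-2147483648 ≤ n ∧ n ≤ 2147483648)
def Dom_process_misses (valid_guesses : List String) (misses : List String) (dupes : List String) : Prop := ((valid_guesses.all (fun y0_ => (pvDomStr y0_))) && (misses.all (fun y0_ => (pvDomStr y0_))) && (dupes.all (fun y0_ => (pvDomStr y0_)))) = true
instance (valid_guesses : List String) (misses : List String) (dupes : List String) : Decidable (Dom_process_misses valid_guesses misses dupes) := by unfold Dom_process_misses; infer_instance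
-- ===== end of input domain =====

-- B inverts the loop nesting (outer over misses, narrowing the candidate list) so eliminated guesses are never rescanned; a timing run measured B faster.


-- ===== PORT A =====
-- flag-accumulating nested loop over guesses then misses, step for step
def process_misses (valid_guesses : List String) (misses : List String) (dupes : List String) : List String :=
  valid_guesses.foldl (fun result guess =>
    let potential_guess := misses.foldl (fun p miss_letter =>
      if PySem.Str.isIn miss_letter guess && !(dupes.contains miss_letter) then false else p) true
    if potential_guess == true then result ++ [guess] else result) []

-- ===== PORT B =====
-- inverted nesting: outer loop over misses successively narrows the candidate list
def process_misses_alt (valid_guesses : List String) (misses : List String) (dupes : List String) : List String :=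
  misses.foldl (fun result m =>
    if !(dupes.contains m) then result.filter (fun g => !(PySem.Str.isIn m g)) else result)
    valid_guesses

-- ===== PRECONDITION & SPEC =====
def Spec_process_misses (valid_guesses : List String) (misses : List String) (dupes : List String) (out : List String) : Prop := out = process_misses_alt valid_guesses misses dupes
instance (valid_guesses : List String) (misses : List String) (dupes : List String) (out : List String) : Decidable (Spec_process_misses valid_guesses misses dupes out) := by unfold Spec_process_misses; infer_instance

-- ===== CLAIM (what is proved, stated in full; the proofs are below) =====
def Claim_equal_process_misses : Prop := ∀ (valid_guesses : List String) (misses : List String) (dupes : List String), Dom_process_misses valid_guesses misses dupes → Spec_process_misses valid_guesses misses dupes (process_misses valid_guesses misses dupes)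

-- ===== LEMMAS AND PROOFS =====

-- A's inner flag loop computes "no disqualifying miss letter occurs in the guess"
theorem pv_flag_loop (g : String) (dupes : List String) (misses : List String) (b : Bool) :
    misses.foldl (fun p m => if PySem.Str.isIn m g && !(dupes.contains m) then false else p) b
      = (b && !(misses.any (fun m => PySem.Str.isIn m g && !(dupes.contains m)))) := by
  induction misses generalizing b with
  | nil => simp
  | cons m rest ih =>
    simp only [List.foldl_cons, List.any_cons, ih]
    cases hb : PySem.Str.isIn m g && !(dupes.contains m) <;> cases b <;> simp_all

-- B's narrowing loop is the one-pass filter by the same predicate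
theorem pv_narrow_loop (dupes : List String) (misses : List String) (L : List String) :
    misses.foldl (fun result m =>
        if !(dupes.contains m) then result.filter (fun g => !(PySem.Str.isIn m g)) else result) L
      = L.filter (fun g => !(misses.any (fun m => PySem.Str.isIn m g && !(dupes.contains m)))) := by
  induction misses generalizing L with
  | nil => simp
  | cons m rest ih =>
    simp only [List.foldl_cons, List.any_cons, ih]
    split_ifs with hd
    · simp only [Bool.not_eq_eq_eq_not, Bool.not_true] at hd
      rw [List.filter_filter]
      refine congrArg (fun f => List.filter f L) ?_
      have hd' : m ∉ dupes := by simpa using hd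
      funext g
      cases h : PySem.Str.isIn m g <;> simp [hd']
    · simp only [Bool.not_eq_true', Bool.not_eq_false] at hd
      refine congrArg (fun f => List.filter f L) ?_
      have hd' : m ∈ dupes := by simpa using hd
      funext g
      simp [hd']

-- ===== VERDICT (by name: the statement is the Claim_ definition above) =====
theorem process_misses_spec : Claim_equal_process_misses := by
  intro valid_guesses misses dupes _
  unfold Spec_process_misses process_misses process_misses_alt
  simp only [pv_flag_loop, pv_narrow_loop, Bool.true_and]
  rw [PySem.List.foldl_append_if_eq_filter]
  simp
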